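-- pv_equiv track=rewrite | github.com/Nikappa57/my-sapienza-experience | Introduzione alla programmazione/LabPython07/A_Ex9.py | A_Ex9
-- ===== SOURCE A (Python) =====
-- def A_Ex9(l):
--     result = list()
--     for s in l:
--         s = sorted(s)
--         max_c = s[0]
--         for c in s:
--             if s.count(c) > s.count(max_c):
--                 max_c = c
--         result.append(max_c)
--     return result
-- ===== SOURCE B (Python) =====
-- def A_Ex9(l):
--     result = []
--     for s in l:
--         counts = {}
--         for ch in s:
--             counts[ch] = counts.get(ch, 0) + 1
--         best = s[0]
--         best_n = counts[best]
--         for ch, n in counts.items():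
--             if n > best_n or (n == best_n and ch < best):
--                 best, best_n = ch, n
--         result.append(best)
--     return result
-- ===== Notes on version B (the rewrite author's own statement) =====
-- stated objective: alternative
-- what changed: Per string, A sorts the characters and calls .count twice inside the loop; B does no sort: it builds a frequency dictionary in one pass and picks the best char (highest count, tie -> smallest char) in a single scan of the dictionary items.
import Mathlib
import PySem

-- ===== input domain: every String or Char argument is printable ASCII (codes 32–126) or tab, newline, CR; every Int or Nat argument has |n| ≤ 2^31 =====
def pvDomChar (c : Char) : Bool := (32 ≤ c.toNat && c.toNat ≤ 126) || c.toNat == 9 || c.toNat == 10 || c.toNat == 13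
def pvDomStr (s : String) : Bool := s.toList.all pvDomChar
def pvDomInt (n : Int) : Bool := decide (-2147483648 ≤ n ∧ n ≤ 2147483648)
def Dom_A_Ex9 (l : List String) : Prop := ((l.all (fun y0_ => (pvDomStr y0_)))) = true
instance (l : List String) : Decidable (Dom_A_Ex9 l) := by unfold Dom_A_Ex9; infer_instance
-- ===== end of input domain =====

-- B replaces A's per-string sort + repeated .count scans by a one-pass frequency
-- dictionary followed by a single (larger count, tie -> smaller char) scan over its items
-- (a different algorithm; no speed is claimed).


-- ===== PORT A =====
-- body of A's outer loop: s = sorted(s); max_c = s[0];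
-- for c in s: if s.count(c) > s.count(max_c): max_c = c; result.append(max_c)
def A_Ex9_stepA (result : List String) (s : String) : List String :=
  let t := PySem.List.sorted s.toList (fun c => c) false
  match PySem.List.pyGet? t 0 with          -- s[0]; none = IndexError, excluded by Pre_
  | some m0 =>
      result ++ [String.ofList [t.foldl (fun m c => if t.count m < t.count c then c else m) m0]]
  | none => result

def A_Ex9 (l : List String) : List String := l.foldl A_Ex9_stepA []

-- ===== PORT B =====
-- body of B's outer loop: build the counts dict in one pass, seed best from s[0],
-- then one scan over counts.items() keeping strictly-larger count or equal count with smaller char.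
def A_Ex9_stepB (result : List String) (s : String) : List String :=
  let counts : PySem.Dict Char Int :=
    s.toList.foldl (fun d ch => d.insert ch (d.getD ch 0 + 1)) PySem.Dict.empty
  match PySem.List.pyGet? s.toList 0 with   -- s[0]; none = IndexError, excluded by Pre_
  | some b0 =>
      -- counts[s[0]]: the key is always present (s[0] occurs in s), so no KeyError
      result ++ [String.ofList [(counts.items.foldl
        (fun (p : Char × Int) q =>
          if p.2 < q.2 ∨ (q.2 = p.2 ∧ q.1 < p.1) then q else p)
        (b0, counts.getD b0 0)).1]]
  | none => result

def A_Ex9_alt (l : List String) : List String := l.foldl A_Ex9_stepB []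

-- ===== PRECONDITION & SPEC =====
-- Pre_ excludes lists containing an empty string: on those A (and B alike) raises IndexError at s[0].
def Pre_A_Ex9 (l : List String) : Prop := ∀ s ∈ l, s ≠ ""
instance (l : List String) : Decidable (Pre_A_Ex9 l) := by unfold Pre_A_Ex9; infer_instance
def pvWitness_A_Ex9 : List String := ["banana", "a b\tb", "zzy"]
def Spec_A_Ex9 (l : List String) (out : List String) : Prop := out = A_Ex9_alt l
instance (l : List String) (out : List String) : Decidable (Spec_A_Ex9 l out) := by unfold Spec_A_Ex9; infer_instance

-- ===== CLAIM (what is proved, stated in full; the proofs are below) =====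
def Claim_equal_A_Ex9 : Prop := ∀ (l : List String), Dom_A_Ex9 l → Pre_A_Ex9 l → Spec_A_Ex9 l (A_Ex9 l)

-- ===== LEMMAS AND PROOFS =====

-- A's inner loop over the sorted list: the result maximises cnt, strict increase is
-- required to move, and among maximisers the result is the first (= smallest) one.
theorem foldA_spec (cnt : Char → Nat) :
    ∀ (t : List Char) (m : Char), t.Pairwise (· ≤ ·) → (∀ c ∈ t, m ≤ c) →
      (t.foldl (fun m c => if cnt m < cnt c then c else m) m = m ∨
        t.foldl (fun m c => if cnt m < cnt c then c else m) m ∈ t) ∧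
      cnt m ≤ cnt (t.foldl (fun m c => if cnt m < cnt c then c else m) m) ∧
      (cnt m = cnt (t.foldl (fun m c => if cnt m < cnt c then c else m) m) →
        t.foldl (fun m c => if cnt m < cnt c then c else m) m = m) ∧
      ∀ c ∈ t, cnt c ≤ cnt (t.foldl (fun m c => if cnt m < cnt c then c else m) m) ∧
        (cnt c = cnt (t.foldl (fun m c => if cnt m < cnt c then c else m) m) →
          t.foldl (fun m c => if cnt m < cnt c then c else m) m ≤ c) := by
  intro t
  induction t with
  | nil => intro m _ _; simp
  | cons c t ih =>
    intro m hpw hle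
    have hpw' := List.pairwise_cons.mp hpw
    simp only [List.foldl_cons]
    by_cases h : cnt m < cnt c
    · simp only [if_pos h]
      obtain ⟨hmem, hle2, heq2, hall⟩ := ih c hpw'.2 hpw'.1
      refine ⟨?_, by omega, ?_, ?_⟩
      · rcases hmem with h1 | h1
        · right; simp [h1]
        · right; exact List.mem_cons_of_mem _ h1
      · intro he; exfalso; omega
      · intro d hd
        rcases List.mem_cons.mp hd with rfl | hd'
        · exact ⟨hle2, fun he => le_of_eq (heq2 he)⟩
        · exact hall d hd'
    · simp only [if_neg h]
      obtain ⟨hmem, hle2, heq2, hall⟩ := ih m hpw'.2 (fun d hd => hle d (List.mem_cons_of_mem _ hd))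
      refine ⟨?_, hle2, heq2, ?_⟩
      · rcases hmem with h1 | h1
        · exact Or.inl h1
        · exact Or.inr (List.mem_cons_of_mem _ h1)
      · intro d hd
        rcases List.mem_cons.mp hd with rfl | hd'
        · refine ⟨by omega, ?_⟩
          intro he
          have hm : cnt m = cnt (t.foldl (fun m c => if cnt m < cnt c then c else m) m) := by omega
          rw [heq2 hm]
          exact hle d (by simp)
        · exact hall d hd'

-- B's inner loop over the dict items: the result strictly dominates the seed and
-- every item under the order (larger count, then smaller char).
theorem foldB_spec :
    ∀ (items : List (Char × Int)) (p0 : Char × Int),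
      (items.foldl (fun p q => if p.2 < q.2 ∨ (q.2 = p.2 ∧ q.1 < p.1) then q else p) p0 = p0 ∨
        items.foldl (fun p q => if p.2 < q.2 ∨ (q.2 = p.2 ∧ q.1 < p.1) then q else p) p0 ∈ items) ∧
      (p0.2 < (items.foldl (fun p q => if p.2 < q.2 ∨ (q.2 = p.2 ∧ q.1 < p.1) then q else p) p0).2 ∨
        (p0.2 = (items.foldl (fun p q => if p.2 < q.2 ∨ (q.2 = p.2 ∧ q.1 < p.1) then q else p) p0).2 ∧
          (items.foldl (fun p q => if p.2 < q.2 ∨ (q.2 = p.2 ∧ q.1 < p.1) then q else p) p0).1 ≤ p0.1)) ∧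
      ∀ q ∈ items,
        q.2 < (items.foldl (fun p q => if p.2 < q.2 ∨ (q.2 = p.2 ∧ q.1 < p.1) then q else p) p0).2 ∨
        (q.2 = (items.foldl (fun p q => if p.2 < q.2 ∨ (q.2 = p.2 ∧ q.1 < p.1) then q else p) p0).2 ∧
          (items.foldl (fun p q => if p.2 < q.2 ∨ (q.2 = p.2 ∧ q.1 < p.1) then q else p) p0).1 ≤ q.1) := by
  intro items
  induction items with
  | nil => intro p0; simp
  | cons q items ih =>
    intro p0
    simp only [List.foldl_cons]
    by_cases h : p0.2 < q.2 ∨ (q.2 = p0.2 ∧ q.1 < p0.1)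
    · simp only [if_pos h]
      obtain ⟨hmem, hseed, hall⟩ := ih q
      refine ⟨?_, ?_, ?_⟩
      · rcases hmem with h1 | h1
        · right; simp [h1]
        · right; exact List.mem_cons_of_mem _ h1
      · rcases h with h | h
        · rcases hseed with hs | hs
          · left; omega
          · left; omega
        · rcases hseed with hs | hs
          · left; omega
          · right; exact ⟨by omega, le_trans hs.2 (le_of_lt h.2)⟩
      · intro q' hq'
        rcases List.mem_cons.mp hq' with rfl | hq2
        · exact hseed
        · exact hall q' hq2
    · simp only [if_neg h]
      obtain ⟨hmem, hseed, hall⟩ := ih p0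
      push Not at h
      refine ⟨?_, hseed, ?_⟩
      · rcases hmem with h1 | h1
        · exact Or.inl h1
        · exact Or.inr (List.mem_cons_of_mem _ h1)
      · intro q' hq'
        rcases List.mem_cons.mp hq' with rfl | hq2
        · by_cases he : q'.2 = p0.2
          · have hqc : p0.1 ≤ q'.1 := h.2 he
            rcases hseed with hs | hs
            · left; omega
            · right; exact ⟨by omega, le_trans hs.2 hqc⟩
          · rcases hseed with hs | hs
            · left; omega
            · left; omega
        · exact hall q' hq2

-- a nonempty string has a nonempty character list
theorem toList_ne_nil (s : String) (hs : s ≠ "") : s.toList ≠ [] := by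
  intro h
  exact hs (by simpa using congrArg String.ofList h)

-- the loop bodies agree on every nonempty string
theorem step_eq (acc : List String) (s : String) (hs : s ≠ "") :
    A_Ex9_stepA acc s = A_Ex9_stepB acc s := by
  obtain ⟨b0, cs', hcs0⟩ : ∃ b0 cs', s.toList = b0 :: cs' := by
    cases h : s.toList with
    | nil => exact absurd h (toList_ne_nil s hs)
    | cons a l => exact ⟨a, l, rfl⟩
  obtain ⟨m0, t', ht⟩ : ∃ m0 t', PySem.List.sorted s.toList (fun c => c) false = m0 :: t' := by
    cases h : PySem.List.sorted s.toList (fun c => c) false with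
    | nil =>
        exfalso
        have hp := PySem.List.sorted_perm s.toList (fun c : Char => c) false
        rw [h] at hp
        exact toList_ne_nil s hs hp.symm.eq_nil
    | cons a l => exact ⟨a, l, rfl⟩
  have hget : PySem.List.pyGet? (PySem.List.sorted s.toList (fun c => c) false) 0 = some m0 := by
    rw [ht]; simp [PySem.List.pyGet?, PySem.List.pyIdx?]
  have hget2 : PySem.List.pyGet? s.toList 0 = some b0 := by
    rw [hcs0]; simp [PySem.List.pyGet?, PySem.List.pyIdx?]
  -- facts about the sorted list
  have hperm : (PySem.List.sorted s.toList (fun c => c) false).Perm s.toList :=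
    PySem.List.sorted_perm s.toList (fun c : Char => c) false
  have hcount : ∀ c : Char, (PySem.List.sorted s.toList (fun c => c) false).count c = s.toList.count c :=
    fun c => hperm.count_eq c
  have hpw : (PySem.List.sorted s.toList (fun c => c) false).Pairwise (· ≤ ·) := by
    simpa using PySem.List.sorted_pairwise (xs := s.toList) (key := fun c : Char => c)
  have hle : ∀ c ∈ PySem.List.sorted s.toList (fun c => c) false, m0 ≤ c := by
    intro c hc
    rw [ht] at hc hpw
    rcases List.mem_cons.mp hc with rfl | hc'
    · exact le_refl c
    · exact (List.pairwise_cons.mp hpw).1 c hc'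
  -- run A's inner loop
  obtain ⟨rA, hrAdef⟩ : ∃ r, (PySem.List.sorted s.toList (fun c => c) false).foldl
      (fun m c => if (PySem.List.sorted s.toList (fun c => c) false).count m <
        (PySem.List.sorted s.toList (fun c => c) false).count c then c else m) m0 = r := ⟨_, rfl⟩
  obtain ⟨hAmem, _, _, hAall⟩ :=
    foldA_spec (fun c => (PySem.List.sorted s.toList (fun c => c) false).count c)
      (PySem.List.sorted s.toList (fun c => c) false) m0 hpw hle
  rw [hrAdef] at hAmem hAall
  have hrAmem : rA ∈ s.toList := by
    rcases hAmem with h1 | h1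
    · rw [h1]; exact hperm.mem_iff.mp (by rw [ht]; simp)
    · exact hperm.mem_iff.mp h1
  have PA : ∀ c ∈ s.toList, s.toList.count c ≤ s.toList.count rA ∧
      (s.toList.count c = s.toList.count rA → rA ≤ c) := by
    intro c hc
    have hfact := hAall c (hperm.mem_iff.mpr hc)
    simp only [hcount] at hfact
    exact hfact
  -- the counts dict is exactly Counter(s); run B's inner loop
  have hctr : s.toList.foldl (fun d ch => d.insert ch (d.getD ch 0 + 1)) PySem.Dict.empty =
      PySem.Dict.counter s.toList := rfl
  have hitems : (PySem.Dict.counter s.toList).items =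
      (PySem.Set.ofList s.toList).map (fun k => (k, (s.toList.count k : Int))) :=
    PySem.Dict.items_counter s.toList
  have hseedn : (PySem.Dict.counter s.toList).getD b0 0 = (s.toList.count b0 : Int) :=
    PySem.Dict.getD_counter s.toList b0
  obtain ⟨rB, hrBdef⟩ : ∃ r, (PySem.Dict.counter s.toList).items.foldl
      (fun p q => if p.2 < q.2 ∨ (q.2 = p.2 ∧ q.1 < p.1) then q else p)
      (b0, (s.toList.count b0 : Int)) = r := ⟨_, rfl⟩
  obtain ⟨hBmem, _, hBall⟩ :=
    foldB_spec (PySem.Dict.counter s.toList).items (b0, (s.toList.count b0 : Int))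
  rw [hrBdef] at hBmem hBall
  have hitem_shape : ∀ q ∈ (PySem.Dict.counter s.toList).items,
      q.1 ∈ s.toList ∧ q.2 = (s.toList.count q.1 : Int) := by
    intro q hq
    rw [hitems] at hq
    obtain ⟨k, hk, rfl⟩ := List.mem_map.mp hq
    exact ⟨(PySem.Set.mem_ofList s.toList k).mp hk, rfl⟩
  have hrB1 : rB.1 ∈ s.toList ∧ rB.2 = (s.toList.count rB.1 : Int) := by
    rcases hBmem with h1 | h1
    · rw [h1]; exact ⟨by rw [hcs0]; simp, rfl⟩
    · exact hitem_shape rB h1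
  have PB : ∀ c ∈ s.toList, s.toList.count c ≤ s.toList.count rB.1 ∧
      (s.toList.count c = s.toList.count rB.1 → rB.1 ≤ c) := by
    intro c hc
    have hq : (c, (s.toList.count c : Int)) ∈ (PySem.Dict.counter s.toList).items := by
      rw [hitems]
      exact List.mem_map.mpr ⟨c, (PySem.Set.mem_ofList s.toList c).mpr hc, rfl⟩
    have hdom : (s.toList.count c : Int) < rB.2 ∨
        ((s.toList.count c : Int) = rB.2 ∧ rB.1 ≤ c) := hBall _ hq
    rw [hrB1.2] at hdom
    constructor
    · rcases hdom with h1 | h1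
      · exact le_of_lt (by exact_mod_cast h1)
      · exact le_of_eq (by exact_mod_cast h1.1)
    · intro he
      rcases hdom with h1 | h1
      · exfalso; rw [he] at h1; exact lt_irrefl _ h1
      · exact h1.2
  -- both characterisations pin down the same character
  have h1 := PA rB.1 hrB1.1
  have h2 := PB rA hrAmem
  have hce : s.toList.count rA = s.toList.count rB.1 := le_antisymm h2.1 h1.1
  have hABchar : rA = rB.1 := le_antisymm (h1.2 hce.symm) (h2.2 hce)
  -- reduce both loop bodies and conclude
  unfold A_Ex9_stepA A_Ex9_stepB
  simp only [hget, hget2, hctr, hseedn, hrAdef, hrBdef, hABchar]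

-- ===== VERDICT (by name: the statement is the Claim_ definition above) =====
theorem A_Ex9_spec : Claim_equal_A_Ex9 := by
  intro l _hdom hpre
  unfold Spec_A_Ex9 A_Ex9 A_Ex9_alt
  apply PySem.List.foldl_congr_mem
  intro acc x hx
  exact step_eq acc x (hpre x hx)
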